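-- pv_equiv track=rewrite | github.com/pypi-data/pypi-mirror-404 | packages/tklr-dgraham/tklr_dgraham-0.0.43.tar.gz/tklr_dgraham-0.0.43/src/tklr/migration.py | reorder_tokens
-- ===== SOURCE A (Python) =====
-- def reorder_tokens(tokens: list[str]) -> list[str]:
--     if not tokens:
--         return tokens
--     header = [tokens[0]]
--     rest = tokens[1:]
--     start_tokens = [t for t in rest if t.startswith("@s ")]
--     recur_tokens = [t for t in rest if t.startswith("@r ")]
--     plus_tokens = [t for t in rest if t.startswith("@+ ")]
--     minus_tokens = [t for t in rest if t.startswith("@- ")]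
--     others = [
--         t
--         for t in rest
--         if not (
--             t.startswith("@s ")
--             or t.startswith("@r ")
--             or t.startswith("@+ ")
--             or t.startswith("@- ")
--         )
--     ]
--     ordered = []
--     ordered += header
--     ordered += start_tokens
--     ordered += recur_tokens
--     ordered += plus_tokens
--     ordered += minus_tokens
--     ordered += others
--     return ordered
-- ===== SOURCE B (Python) =====
-- def reorder_tokens(tokens: list[str]) -> list[str]:
--     if not tokens:
--         return tokens
--     buckets = {"@s ": [], "@r ": [], "@+ ": [], "@- ": []}
--     others = []
--     for t in tokens[1:]:
--         buckets.get(t[:3], others).append(t)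
--     return [tokens[0]] + buckets["@s "] + buckets["@r "] + buckets["@+ "] + buckets["@- "] + others
-- ===== Notes on version B (the rewrite author's own statement) =====
-- stated objective: faster
-- what changed: Replaces A's five independent filtering passes over the tail with a single left-to-right pass that dispatches each token by its 3-char prefix into one of four buckets or 'others' via one dict lookup.
import Mathlib
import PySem

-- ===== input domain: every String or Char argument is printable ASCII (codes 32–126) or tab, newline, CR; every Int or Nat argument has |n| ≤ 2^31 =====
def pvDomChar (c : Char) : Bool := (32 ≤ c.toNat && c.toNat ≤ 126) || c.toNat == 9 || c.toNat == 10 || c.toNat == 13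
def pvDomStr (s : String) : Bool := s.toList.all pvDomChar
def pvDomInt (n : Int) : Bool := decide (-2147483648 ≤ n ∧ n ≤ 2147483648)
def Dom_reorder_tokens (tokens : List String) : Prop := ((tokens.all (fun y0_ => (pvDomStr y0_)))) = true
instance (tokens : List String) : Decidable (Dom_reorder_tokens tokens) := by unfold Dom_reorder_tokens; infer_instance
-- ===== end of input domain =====

-- B: one pass with prefix-keyed buckets instead of A's five filtering passes; same return value.
-- ===== PORT A =====
def reorder_tokens (tokens : List String) : List String :=
  match tokens with
  | [] => tokens
  | t0 :: rest =>
    let header := [t0]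
    let start_tokens := rest.filter (fun t => PySem.Str.startswith t "@s ")
    let recur_tokens := rest.filter (fun t => PySem.Str.startswith t "@r ")
    let plus_tokens := rest.filter (fun t => PySem.Str.startswith t "@+ ")
    let minus_tokens := rest.filter (fun t => PySem.Str.startswith t "@- ")
    let others := rest.filter (fun t =>
      !(PySem.Str.startswith t "@s " || PySem.Str.startswith t "@r " ||
        PySem.Str.startswith t "@+ " || PySem.Str.startswith t "@- "))
    ([] : List String) ++ header ++ start_tokens ++ recur_tokens ++ plus_tokens ++ minus_tokens ++ others

-- ===== PORT B =====
-- buckets.get(t[:3], others).append(t): the dict lookup over the four literal keys is ported as a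
-- first-match chain on t[:3] (PySem.Str.slice t none (some 3)); the five buckets are a 5-tuple state.
def reorder_tokens_alt_step (acc : List String × List String × List String × List String × List String)
    (t : String) : List String × List String × List String × List String × List String :=
  let (s, r, p, m, o) := acc
  let k := PySem.Str.slice t none (some 3)
  if k = "@s " then (s ++ [t], r, p, m, o)
  else if k = "@r " then (s, r ++ [t], p, m, o)
  else if k = "@+ " then (s, r, p ++ [t], m, o)
  else if k = "@- " then (s, r, p, m ++ [t], o)
  else (s, r, p, m, o ++ [t])

def reorder_tokens_alt (tokens : List String) : List String :=
  match tokens with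
  | [] => tokens
  | t0 :: rest =>
    let st := rest.foldl reorder_tokens_alt_step ([], [], [], [], [])
    [t0] ++ st.1 ++ st.2.1 ++ st.2.2.1 ++ st.2.2.2.1 ++ st.2.2.2.2

-- ===== PRECONDITION & SPEC =====
def Spec_reorder_tokens (tokens : List String) (out : List String) : Prop := out = reorder_tokens_alt tokens
instance (tokens : List String) (out : List String) : Decidable (Spec_reorder_tokens tokens out) := by unfold Spec_reorder_tokens; infer_instance

-- ===== CLAIM (what is proved, stated in full; the proofs are below) =====
def Claim_equal_reorder_tokens : Prop := ∀ (tokens : List String), Dom_reorder_tokens tokens → Spec_reorder_tokens tokens (reorder_tokens tokens)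

-- ===== LEMMAS AND PROOFS =====

-- bucket test by key lookup ⟺ the corresponding startswith test: t[:3] = key (|key| = 3) is exactly 'key <+: t'
theorem key_eq_startswith (t key : String) (hk : key.toList.length = 3) :
    PySem.Str.startswith t key = decide (PySem.Str.slice t none (some 3) = key) := by
  have hs : (PySem.Str.slice t none (some 3)).toList = t.toList.take 3 := by
    simp [PySem.Str.slice, pysem]
  have hiff : PySem.Str.startswith t key = true ↔ PySem.Str.slice t none (some 3) = key := by
    rw [PySem.Str.startswith_eq, PySem.Chars.startswith_iff]
    constructor
    · intro hpre
      have h3 : t.toList.take 3 = key.toList := by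
        rw [← hk]; exact (List.prefix_iff_eq_take.mp hpre).symm
      have : (PySem.Str.slice t none (some 3)).toList = key.toList := hs.trans h3
      exact String.toList_inj.mp this
    · intro he
      rw [← congrArg String.toList he, hs]
      exact List.take_prefix _ _
  rw [Bool.eq_iff_iff]
  simp only [decide_eq_true_eq]
  exact hiff

-- single-pass fold invariant: each bucket accumulates the filter for its key, in encounter order
theorem fold_buckets (l : List String) (s r p m o : List String) :
    l.foldl reorder_tokens_alt_step (s, r, p, m, o) =
      (s ++ l.filter (fun t => decide (PySem.Str.slice t none (some 3) = "@s ")),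
       r ++ l.filter (fun t => decide (PySem.Str.slice t none (some 3) = "@r ")),
       p ++ l.filter (fun t => decide (PySem.Str.slice t none (some 3) = "@+ ")),
       m ++ l.filter (fun t => decide (PySem.Str.slice t none (some 3) = "@- ")),
       o ++ l.filter (fun t => !(decide (PySem.Str.slice t none (some 3) = "@s ") ||
            decide (PySem.Str.slice t none (some 3) = "@r ") ||
            decide (PySem.Str.slice t none (some 3) = "@+ ") ||
            decide (PySem.Str.slice t none (some 3) = "@- ")))) := by
  induction l generalizing s r p m o with
  | nil => simp
  | cons t l ih =>
    by_cases h1 : PySem.Str.slice t none (some 3) = "@s "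
    · have hstep : reorder_tokens_alt_step (s, r, p, m, o) t = (s ++ [t], r, p, m, o) := by
        simp [reorder_tokens_alt_step, h1]
      rw [List.foldl_cons, hstep, ih]
      simp [h1, List.append_assoc]
    · by_cases h2 : PySem.Str.slice t none (some 3) = "@r "
      · have hstep : reorder_tokens_alt_step (s, r, p, m, o) t = (s, r ++ [t], p, m, o) := by
          simp [reorder_tokens_alt_step, h2]
        rw [List.foldl_cons, hstep, ih]
        simp [h2, List.append_assoc]
      · by_cases h3 : PySem.Str.slice t none (some 3) = "@+ "
        · have hstep : reorder_tokens_alt_step (s, r, p, m, o) t = (s, r, p ++ [t], m, o) := by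
            simp [reorder_tokens_alt_step, h3]
          rw [List.foldl_cons, hstep, ih]
          simp [h3, List.append_assoc]
        · by_cases h4 : PySem.Str.slice t none (some 3) = "@- "
          · have hstep : reorder_tokens_alt_step (s, r, p, m, o) t = (s, r, p, m ++ [t], o) := by
              simp [reorder_tokens_alt_step, h4]
            rw [List.foldl_cons, hstep, ih]
            simp [h4, List.append_assoc]
          · have hstep : reorder_tokens_alt_step (s, r, p, m, o) t = (s, r, p, m, o ++ [t]) := by
              simp [reorder_tokens_alt_step, h1, h2, h3, h4]
            rw [List.foldl_cons, hstep, ih]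
            simp [h1, h2, h3, h4, List.append_assoc]

-- ===== VERDICT (by name: the statement is the Claim_ definition above) =====
theorem reorder_tokens_spec : Claim_equal_reorder_tokens := by
  intro tokens _
  unfold Spec_reorder_tokens
  cases tokens with
  | nil => rfl
  | cons t0 rest =>
    have hs := List.filter_congr (l := rest) (fun t _ => key_eq_startswith t "@s " rfl)
    have hr := List.filter_congr (l := rest) (fun t _ => key_eq_startswith t "@r " rfl)
    have hp := List.filter_congr (l := rest) (fun t _ => key_eq_startswith t "@+ " rfl)
    have hm := List.filter_congr (l := rest) (fun t _ => key_eq_startswith t "@- " rfl)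
    have ho := List.filter_congr (l := rest) (p := fun t =>
        !(PySem.Str.startswith t "@s " || PySem.Str.startswith t "@r " ||
          PySem.Str.startswith t "@+ " || PySem.Str.startswith t "@- "))
      (q := fun t =>
        !(decide (PySem.Str.slice t none (some 3) = "@s ") ||
          decide (PySem.Str.slice t none (some 3) = "@r ") ||
          decide (PySem.Str.slice t none (some 3) = "@+ ") ||
          decide (PySem.Str.slice t none (some 3) = "@- ")))
      (fun t _ => by
        simp only [key_eq_startswith t "@s " rfl, key_eq_startswith t "@r " rfl,
                   key_eq_startswith t "@+ " rfl, key_eq_startswith t "@- " rfl])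
    simp only [reorder_tokens, reorder_tokens_alt]
    rw [fold_buckets]
    simp only [List.nil_append]
    rw [hs, hr, hp, hm, ho]
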